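-- pv_equiv track=rewrite | github.com/Panda4817/advent-of-code-2022 | year2016/09/09.py | part1
-- ===== SOURCE A (Python) =====
-- def part1(data):
--   decompressed = ""
--   tot_length = len(data)
--   skip = 0
--   for i in range(tot_length):
--     if skip != 0 and skip != i:
--       continue
--     skip = 0
--     if data[i] == '(':
--       first = ''
--       x = i
--       while (data[x] != "x"):
--         x += 1
--         if data[x] == "x":
--           break
--         first += data[x]
--       length = int(first)
--       last =""
--       while (data[x] != ")"):
--         x += 1
--         if data[x] == ")":
--           break
--         last += data[x]
--       repeat = int(last)
--       skip = x + length + 1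
--       for r in range(repeat):
--         decompressed += data[x + 1:x + length + 1]
--     else:
--       decompressed += data[i]
--
--   return len(decompressed)
-- ===== SOURCE B (Python) =====
-- def part1(data):
--   n = len(data)
--   total = 0
--   i = 0
--   while i < n:
--     if data[i] == '(':
--       x = i + 1
--       while data[x] != 'x':
--         x += 1
--       close = x + 1
--       while data[close] != ')':
--         close += 1
--       length = int(data[i + 1:x])
--       repeat = int(data[x + 1:close])
--       avail = min(length, n - close - 1)
--       total += repeat * avail
--       i = close + 1 + length
--     else:
--       total += 1
--       i += 1
--   return total
-- ===== Notes on version B (the rewrite author's own statement) =====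
-- stated objective: alternative
-- what changed: B never builds the decompressed string: a counting pass that, at each marker, parses length/repeat, adds repeat*min(length, chars-left) to a counter and jumps the index past the marker's data, where A copies the data repeat times into a growing string and walks every index with a skip flag; same measured cost on the benchmark inputs.
-- outside the precondition, e.g. on part1('(-1x2)ab'): A returns 3, B returns 1; on part1('(2x2)(abc'): A returns 6, B returns 6; on part1('(12)'): A raises IndexError, B raises IndexError
import Mathlib
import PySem

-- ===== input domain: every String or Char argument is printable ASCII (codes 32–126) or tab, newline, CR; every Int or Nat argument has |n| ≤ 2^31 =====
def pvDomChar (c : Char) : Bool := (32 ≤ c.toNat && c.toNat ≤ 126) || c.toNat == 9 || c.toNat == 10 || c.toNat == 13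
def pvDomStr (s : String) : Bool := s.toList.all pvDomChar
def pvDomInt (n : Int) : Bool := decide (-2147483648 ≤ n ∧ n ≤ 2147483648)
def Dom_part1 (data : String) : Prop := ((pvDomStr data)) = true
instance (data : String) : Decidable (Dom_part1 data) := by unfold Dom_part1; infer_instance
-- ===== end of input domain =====

-- B computes the decompressed length with a counting pass that jumps the index over each
-- marker's data (adding length*repeat), instead of A's building of the whole decompressed
-- string under a per-index skip flag; objective: alternative.

-- ===== PORT A =====
-- A's two inner 'while' loops: advance x, break when data[x] == c, else collect data[x].
-- Both character accesses use getD ' '; Python raises IndexError where x runs out of range,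
-- which only happens outside Pre_part1 (fuel exhaustion likewise only occurs there).
def pvScanA (l : List Char) (c : Char) : Nat → Nat → List Char → Nat × List Char
  | 0, x, acc => (x, acc)
  | fuel+1, x, acc =>
    if l.getD x ' ' ≠ c then
      if l.getD (x+1) ' ' = c then (x+1, acc)
      else pvScanA l c fuel (x+1) (acc ++ [l.getD (x+1) ' '])
    else (x, acc)

-- A's main 'for i in range(len(data))' loop with its (decompressed, skip) state.
-- int(first)/int(last) are PySem.Int.ofChars?; '.getD 0' stands in for the ValueError,
-- which Pre_part1 excludes.
def pvLoopA (l : List Char) (i : Nat) (dec : List Char) (skip : Int) : List Char :=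
  if h : i < l.length then
    if skip ≠ 0 ∧ skip ≠ (i : Int) then pvLoopA l (i+1) dec skip
    else
      if l.getD i ' ' = '(' then
        let p := pvScanA l 'x' l.length i []
        let len := (PySem.Int.ofChars? p.2).getD 0
        let q := pvScanA l ')' l.length p.1 []
        let rep := (PySem.Int.ofChars? q.2).getD 0
        let piece := PySem.List.slice l (some ((q.1 : Int) + 1)) (some ((q.1 : Int) + len + 1))
        let dec' := (PySem.List.pyRange 0 rep 1).foldl (fun d _ => d ++ piece) dec
        pvLoopA l (i+1) dec' ((q.1 : Int) + len + 1)
      else pvLoopA l (i+1) (dec ++ [l.getD i ' ']) 0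
  else dec
termination_by l.length - i

def part1 (data : String) : Int :=
  ((pvLoopA data.toList 0 [] 0).length : Int)

-- ===== PORT B =====
-- Source B's 'while data[x] != c: x += 1' scans (getD ' ' / fuel only reachable outside Pre_part1).
def pvFindB (l : List Char) (c : Char) : Nat → Nat → Nat
  | 0, x => x
  | fuel+1, x => if l.getD x ' ' ≠ c then pvFindB l c fuel (x+1) else x

-- Source B's main 'while i < n' counting loop; i is a Nat (inside Pre_part1 the parsed length is
-- ≥ 0, so Source B's i never goes negative); fuel l.length bounds the iteration count, which
-- suffices since i strictly increases inside Pre_part1.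
def pvLoopB (l : List Char) : Nat → Nat → Int → Int
  | 0, _, total => total
  | fuel+1, i, total =>
    if i < l.length then
      if l.getD i ' ' = '(' then
        let x := pvFindB l 'x' l.length (i+1)
        let close := pvFindB l ')' l.length (x+1)
        let len := (PySem.Int.ofChars? (PySem.List.slice l (some ((i : Int) + 1)) (some (x : Int)))).getD 0
        let rep := (PySem.Int.ofChars? (PySem.List.slice l (some ((x : Int) + 1)) (some (close : Int)))).getD 0
        let avail := min len ((l.length : Int) - close - 1)
        pvLoopB l fuel ((close : Int) + 1 + len).toNat (total + rep * avail)
      else pvLoopB l fuel (i+1) (total + 1)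
    else total

def part1_alt (data : String) : Int :=
  pvLoopB data.toList data.toList.length 0 0

-- ===== PRECONDITION & SPEC =====
def pvNonnegInt? (cs : List Char) : Bool :=
  match PySem.Int.ofChars? cs with
  | some v => decide (0 ≤ v)
  | none => false

-- the shape required after every '(': a chunk int()-parseable to a nonnegative value, then
-- 'x', then such a chunk again, then ')'
def pvMarkerOk (m : List Char) : Bool :=
  let d1 := m.takeWhile (· ≠ 'x')
  let r1 := m.dropWhile (· ≠ 'x')
  (r1.headD ' ' == 'x') &&
  (let m2 := r1.tail
   let d2 := m2.takeWhile (· ≠ ')')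
   let r2 := m2.dropWhile (· ≠ ')')
   (r2.headD ' ' == ')') && pvNonnegInt? d1 && pvNonnegInt? d2)

-- Pre_part1 excludes inputs on which some '(' is not followed by
-- <nonnegative int>'x'<nonnegative int>')' : there A raises (IndexError scanning past the end,
-- or ValueError from int()) unless the malformed '(' sits in text or is covered by a negative
-- parsed length, where A's value is an accident of its skip-index bookkeeping.
def Pre_part1 (data : String) : Prop :=
  ∀ i < data.toList.length, data.toList.getD i ' ' = '(' → pvMarkerOk (data.toList.drop (i+1)) = true

instance (data : String) : Decidable (Pre_part1 data) := by unfold Pre_part1; infer_instance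

def pvWitness_part1 : String := "X(8x2)(3x3)ABCY"

def Spec_part1 (data : String) (out : Int) : Prop := out = part1_alt data
instance (data : String) (out : Int) : Decidable (Spec_part1 data out) := by unfold Spec_part1; infer_instance

-- ===== CLAIM (what is proved, stated in full; the proofs are below) =====
def Claim_equal_part1 : Prop := ∀ (data : String), Dom_part1 data → Pre_part1 data → Spec_part1 data (part1 data)

-- ===== LEMMAS AND PROOFS =====

theorem pv_getD_eq_headD_drop (l : List Char) (n : Nat) (d : Char) :
    l.getD n d = (l.drop n).headD d := by
  induction l generalizing n with
  | nil => simp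
  | cons a t ih =>
    cases n with
    | zero => simp
    | succ m => simp

theorem pvScanA_spec (l : List Char) (c : Char) (v : List Char) :
    ∀ (w : List Char) (x : Nat) (acc : List Char) (fuel : Nat), (∀ ch ∈ v, ch ≠ c) →
    l.getD x ' ' ≠ c → l.drop (x+1) = v ++ c :: w → v.length + 1 ≤ fuel →
    pvScanA l c fuel x acc = (x + (v.length + 1), acc ++ v) := by
  induction v with
  | nil =>
    intro w x acc fuel _ hx hdrop hfuel
    obtain ⟨f, rfl⟩ : ∃ f, fuel = f + 1 := ⟨fuel - 1, by omega⟩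
    have hc : l.getD (x+1) ' ' = c := by rw [pv_getD_eq_headD_drop, hdrop]; simp
    rw [pvScanA, if_pos hx, if_pos hc]
    simp
  | cons ch v' ih =>
    intro w x acc fuel hv hx hdrop hfuel
    obtain ⟨f, rfl⟩ : ∃ f, fuel = f + 1 := ⟨fuel - 1, by omega⟩
    have hch : l.getD (x+1) ' ' = ch := by rw [pv_getD_eq_headD_drop, hdrop]; simp
    have hne : ch ≠ c := hv ch (by simp)
    have hdrop2 : l.drop (x+1+1) = v' ++ c :: w := by
      have h2 : l.drop (x+1+1) = (l.drop (x+1)).drop 1 := by rw [List.drop_drop]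
      rw [h2, hdrop]; simp
    have hrec := ih w (x+1) (acc ++ [ch]) f (fun a ha => hv a (by simp [ha]))
      (by rw [hch]; exact hne) hdrop2 (by simp at hfuel ⊢; omega)
    rw [pvScanA, if_pos hx, if_neg (by rw [hch]; exact hne), hch, hrec]
    simp; omega

theorem pvFindB_spec (l : List Char) (c : Char) (v : List Char) :
    ∀ (w : List Char) (x : Nat) (fuel : Nat), (∀ ch ∈ v, ch ≠ c) →
    l.drop x = v ++ c :: w → v.length + 1 ≤ fuel →
    pvFindB l c fuel x = x + v.length := by
  induction v with
  | nil =>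
    intro w x fuel _ hdrop hfuel
    obtain ⟨f, rfl⟩ : ∃ f, fuel = f + 1 := ⟨fuel - 1, by omega⟩
    have hc : l.getD x ' ' = c := by rw [pv_getD_eq_headD_drop, hdrop]; simp
    rw [pvFindB, if_neg (by rw [List.getD_eq_getElem?_getD] at hc; simp [hc])]
    simp
  | cons ch v' ih =>
    intro w x fuel hv hdrop hfuel
    obtain ⟨f, rfl⟩ : ∃ f, fuel = f + 1 := ⟨fuel - 1, by omega⟩
    have hch : l.getD x ' ' = ch := by rw [pv_getD_eq_headD_drop, hdrop]; simp
    have hne : ch ≠ c := hv ch (by simp)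
    have hdrop2 : l.drop (x+1) = v' ++ c :: w := by
      have h2 : l.drop (x+1) = (l.drop x).drop 1 := by rw [List.drop_drop]
      rw [h2, hdrop]; simp
    rw [pvFindB, if_pos (by rw [hch]; exact hne),
        ih w (x+1) f (fun a ha => hv a (by simp [ha])) hdrop2 (by simp at hfuel ⊢; omega)]
    simp; omega

theorem pvNonnegInt?_spec (cs : List Char) (h : pvNonnegInt? cs = true) :
    ∃ v, PySem.Int.ofChars? cs = some v ∧ 0 ≤ v := by
  unfold pvNonnegInt? at h
  cases hc : PySem.Int.ofChars? cs with
  | none => rw [hc] at h; simp at h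
  | some v => rw [hc] at h; simp at h; exact ⟨v, rfl, h⟩

theorem pv_split_head (p : Char → Bool) (m : List Char) (c : Char)
    (h : (m.dropWhile p).headD ' ' = c) (hc : c ≠ ' ') :
    m = m.takeWhile p ++ c :: (m.dropWhile p).tail ∧ ∀ ch ∈ m.takeWhile p, p ch := by
  have hd : m.dropWhile p ≠ [] := by
    intro hnil; rw [hnil] at h; simp at h; exact hc h.symm
  constructor
  · conv_lhs => rw [← List.takeWhile_append_dropWhile (p := p) (l := m)]
    congr 1
    cases hdw : m.dropWhile p with
    | nil => exact absurd hdw hd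
    | cons a t => rw [hdw] at h; simp at h; simp [h]
  · intro ch hch; exact List.mem_takeWhile_imp hch

theorem pvMarkerOk_decomp (m : List Char) (h : pvMarkerOk m = true) :
    ∃ d1 d2 rest v1 v2,
      m = d1 ++ 'x' :: (d2 ++ ')' :: rest) ∧
      (∀ ch ∈ d1, ch ≠ 'x') ∧ (∀ ch ∈ d2, ch ≠ ')') ∧
      PySem.Int.ofChars? d1 = some v1 ∧ 0 ≤ v1 ∧
      PySem.Int.ofChars? d2 = some v2 ∧ 0 ≤ v2 := by
  unfold pvMarkerOk at h
  simp only [Bool.and_eq_true, beq_iff_eq] at h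
  obtain ⟨hx, ⟨hp, h1⟩, h2⟩ := h
  obtain ⟨v1, hv1, hv1n⟩ := pvNonnegInt?_spec _ h1
  obtain ⟨v2, hv2, hv2n⟩ := pvNonnegInt?_spec _ h2
  obtain ⟨hm, hall1⟩ := pv_split_head _ m 'x' hx (by decide)
  set m2 := (m.dropWhile (· ≠ 'x')).tail with hm2
  obtain ⟨hm2eq, hall2⟩ := pv_split_head _ m2 ')' hp (by decide)
  refine ⟨m.takeWhile (· ≠ 'x'), m2.takeWhile (· ≠ ')'), (m2.dropWhile (· ≠ ')')).tail,
    v1, v2, ?_, ?_, ?_, hv1, hv1n, hv2, hv2n⟩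
  · conv_lhs => rw [hm]
    rw [← hm2eq]
  · intro ch hch; simpa using hall1 ch hch
  · intro ch hch; simpa using hall2 ch hch

theorem pv_foldl_append_const_length (m : List Int) :
    ∀ (d p : List Char), (m.foldl (fun d _ => d ++ p) d).length = d.length + m.length * p.length := by
  induction m with
  | nil => intro d p; simp
  | cons a t ih =>
    intro d p
    rw [List.foldl_cons, ih]
    simp; ring

theorem pvLoopB_add (l : List Char) :
    ∀ fuel i t, pvLoopB l fuel i t = t + pvLoopB l fuel i 0 := by
  intro fuel
  induction fuel with
  | zero => intro i t; simp [pvLoopB]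
  | succ f ih =>
    intro i t
    rw [pvLoopB]; conv_rhs => rw [pvLoopB]
    by_cases h : i < l.length
    · rw [if_pos h, if_pos h]
      by_cases hp : l.getD i ' ' = '('
      · rw [if_pos hp, if_pos hp]
        simp only
        rw [ih _ (t + _), ih _ (0 + _)]
        ring
      · rw [if_neg hp, if_neg hp, ih _ (t+1), ih _ (0+1)]
        ring
    · rw [if_neg h, if_neg h]; ring

theorem pvLoopA_skip (l : List Char) (s : Int) (hs : 0 < s) :
    ∀ (i : Nat) (dec : List Char), (i : Int) ≤ s → pvLoopA l i dec s = pvLoopA l s.toNat dec 0 := by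
  have H : ∀ (k i : Nat) (dec : List Char), l.length - i ≤ k → (i : Int) ≤ s →
      pvLoopA l i dec s = pvLoopA l s.toNat dec 0 := by
    intro k
    induction k with
    | zero =>
      intro i dec hk hi
      have hn : ¬ i < l.length := by omega
      have hn' : ¬ s.toNat < l.length := by omega
      rw [pvLoopA, dif_neg hn, pvLoopA, dif_neg hn']
    | succ k ih =>
      intro i dec hk hi
      by_cases h : i < l.length
      · by_cases hieq : (i : Int) = s
        · have h2 : s.toNat = i := by omega
          rw [h2]
          rw [pvLoopA]; conv_rhs => rw [pvLoopA]
          rw [dif_pos h, dif_pos h, if_neg (show ¬(s ≠ 0 ∧ s ≠ (i:Int)) by push Not; intro _; omega),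
              if_neg (show ¬((0:Int) ≠ 0 ∧ (0:Int) ≠ (i:Int)) by simp)]
        · have hlt : (i : Int) < s := lt_of_le_of_ne hi hieq
          rw [pvLoopA, dif_pos h, if_pos ⟨by omega, by omega⟩]
          exact ih (i+1) dec (by omega) (by omega)
      · have hn' : ¬ s.toNat < l.length := by omega
        rw [pvLoopA, dif_neg h, pvLoopA, dif_neg hn']
  intro i dec hi
  exact H (l.length - i) i dec (by omega) hi

theorem pv_main (l : List Char)
    (hPre : ∀ i < l.length, l.getD i ' ' = '(' → pvMarkerOk (l.drop (i+1)) = true) :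
    ∀ fuel i dec, l.length - i ≤ fuel →
    ((pvLoopA l i dec 0).length : Int) = (dec.length : Int) + pvLoopB l fuel i 0 := by
  intro fuel
  induction fuel with
  | zero =>
    intro i dec hk
    have hn : ¬ i < l.length := by omega
    rw [pvLoopA, dif_neg hn, pvLoopB]; simp
  | succ fuel ih =>
    intro i dec hk
    by_cases h : i < l.length
    · by_cases hpar : l.getD i ' ' = '('
      · -- marker case
        obtain ⟨d1, d2, rest, v1, v2, hdec, hd1x, hd2p, hv1, hv1n, hv2, hv2n⟩ :=
          pvMarkerOk_decomp _ (hPre i h hpar)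
        have hlen : l.length = i + 1 + d1.length + 1 + d2.length + 1 + rest.length := by
          have := congrArg List.length hdec
          simp [List.length_drop] at this
          omega
        -- positions
        set x := i + (d1.length + 1) with hxdef
        set close := x + (d2.length + 1) with hclosedef
        have hdrop1 : l.drop (i+1) = d1 ++ 'x' :: (d2 ++ ')' :: rest) := hdec
        have hdropx1 : l.drop (x+1) = d2 ++ ')' :: rest := by
          have h1 : l.drop (x+1) = (l.drop (i+1)).drop (d1.length + 1) := by
            rw [List.drop_drop]; congr 1; omega
          rw [h1, hdrop1]
          have : d1 ++ 'x' :: (d2 ++ ')' :: rest) = (d1 ++ ['x']) ++ (d2 ++ ')' :: rest) := by simp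
          rw [this]
          have hL : d1.length + 1 = (d1 ++ ['x']).length := by simp
          rw [hL, List.drop_left]
        have hdropc1 : l.drop (close+1) = rest := by
          have h1 : l.drop (close+1) = (l.drop (x+1)).drop (d2.length + 1) := by
            rw [List.drop_drop]; congr 1; omega
          rw [h1, hdropx1]
          have : d2 ++ ')' :: rest = (d2 ++ [')']) ++ rest := by simp
          rw [this]
          have hL : d2.length + 1 = (d2 ++ [')']).length := by simp
          rw [hL, List.drop_left]
        have hgx : l.getD x ' ' = 'x' := by
          rw [pv_getD_eq_headD_drop]
          have h1 : l.drop x = (l.drop (i+1)).drop d1.length := by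
            rw [List.drop_drop]; congr 1; omega
          rw [h1, hdrop1, List.drop_append_of_le_length (by omega)]
          simp
        -- A's scans
        have hscan1 : pvScanA l 'x' l.length i [] = (x, d1) := by
          rw [pvScanA_spec l 'x' d1 (d2 ++ ')' :: rest) i [] l.length hd1x
            (by rw [hpar]; decide) hdrop1 (by omega)]
          simp
          omega
        have hscan2 : pvScanA l ')' l.length x [] = (close, d2) := by
          rw [pvScanA_spec l ')' d2 rest x [] l.length hd2p
            (by rw [hgx]; decide) hdropx1 (by omega)]
          simp
          omega
        -- B's finds
        have hfind1 : pvFindB l 'x' l.length (i+1) = x := by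
          rw [pvFindB_spec l 'x' d1 (d2 ++ ')' :: rest) (i+1) l.length hd1x hdrop1 (by omega)]
          omega
        have hfind2 : pvFindB l ')' l.length (x+1) = close := by
          rw [pvFindB_spec l ')' d2 rest (x+1) l.length hd2p hdropx1 (by omega)]
          omega
        -- B's slices
        have hslice1 : PySem.List.slice l (some ((i : Int) + 1)) (some (x : Int)) = d1 := by
          have e1 : (i : Int) + 1 = ((i+1 : Nat) : Int) := by push_cast; ring
          rw [e1, PySem.List.slice_natCast, hdrop1]
          have e2 : x - (i+1) = d1.length := by omega
          rw [e2, List.take_left]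
        have hslice2 : PySem.List.slice l (some ((x : Int) + 1)) (some (close : Int)) = d2 := by
          have e1 : (x : Int) + 1 = ((x+1 : Nat) : Int) := by push_cast; ring
          rw [e1, PySem.List.slice_natCast, hdropx1]
          have e2 : close - (x+1) = d2.length := by omega
          rw [e2, List.take_left]
        -- A's piece
        have hpiece : PySem.List.slice l (some ((close : Int) + 1)) (some ((close : Int) + v1 + 1))
            = rest.take v1.toNat := by
          have e1 : (close : Int) + 1 = ((close+1 : Nat) : Int) := by push_cast; ring
          have e2 : (close : Int) + v1 + 1 = ((close+1 : Nat) : Int) + (v1.toNat : Int) := by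
            push_cast [Int.toNat_of_nonneg hv1n]; ring
          rw [e1, e2, PySem.List.slice_natCast_add, hdropc1]
        -- unfold A once
        rw [pvLoopA, dif_pos h, if_neg (show ¬((0:Int) ≠ 0 ∧ (0:Int) ≠ (i:Int)) by simp),
            if_pos hpar]
        simp only [hscan1, hscan2, hv1, hv2, Option.getD_some, hpiece]
        -- skip jump
        rw [pvLoopA_skip l ((close : Int) + v1 + 1) (by omega) (i+1) _ (by push_cast; omega)]
        have hsnat : ((close : Int) + v1 + 1).toNat = close + 1 + v1.toNat := by omega
        rw [hsnat]
        rw [ih (close + 1 + v1.toNat) _ (by omega)]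
        -- A's decompressed growth
        rw [pv_foldl_append_const_length]
        -- unfold B once
        rw [pvLoopB, if_pos h, if_pos hpar]
        simp only [hfind1, hfind2, hslice1, hslice2, hv1, hv2, Option.getD_some]
        have hiB : ((close : Int) + 1 + v1).toNat = close + 1 + v1.toNat := by omega
        rw [hiB, pvLoopB_add l fuel (close + 1 + v1.toNat) (0 + v2 * min v1 ((l.length : Int) - close - 1))]
        -- arithmetic
        have hrest : (l.length : Int) - close - 1 = rest.length := by omega
        rw [hrest]
        simp only [PySem.List.length_pyRange_one, List.length_take]
        push_cast [Int.toNat_of_nonneg hv1n]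
        have hv2' : ((v2 - 0).toNat : Int) = v2 := by omega
        rw [hv2']; ring
      · -- plain character
        rw [pvLoopA, dif_pos h, if_neg (show ¬((0:Int) ≠ 0 ∧ (0:Int) ≠ (i:Int)) by simp),
            if_neg hpar]
        rw [ih (i+1) _ (by omega)]
        rw [pvLoopB, if_pos h, if_neg hpar, pvLoopB_add l fuel (i+1) (0+1)]
        simp; ring
    · rw [pvLoopA, dif_neg h, pvLoopB, if_neg h]
      simp

-- ===== VERDICT (by name: the statement is the Claim_ definition above) =====
theorem part1_spec : Claim_equal_part1 := by
  intro data _ hPre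
  unfold Spec_part1 part1 part1_alt
  have := pv_main data.toList hPre data.toList.length 0 [] (by omega)
  simpa using this
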